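-- pv_equiv track=rewrite | github.com/danieljhkim/DataStructures-Algorithms | python/leetcode/practice/practice11.py | maxSumDistinctTriplet
-- ===== SOURCE A (Python) =====
-- from typing import List
--
-- from collections import Counter, deque, defaultdict, OrderedDict
--
-- def maxSumDistinctTriplet(x: List[int], y: List[int]) -> int:  # O(N) - 152ms
--     nmap = defaultdict(int)
--     for i, n in enumerate(x):
--         nmap[n] = max(nmap[n], y[i])
--     if len(nmap) < 3:
--         return -1
--     a = b = c = -1
--     for n in nmap.values():
--         if n > a:
--             c = b
--             b = a
--             a = n
--         elif n > b:
--             c = b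
--             b = n
--         elif n > c:
--             c = n
--     return a + b + c
-- ===== SOURCE B (Python) =====
-- from typing import List
--
--
-- def maxSumDistinctTriplet(x: List[int], y: List[int]) -> int:
--     best = {}
--     for n, v in zip(x, y):
--         best[n] = max(best.get(n, 0), v)
--     if len(best) < 3:
--         return -1
--     return sum(sorted(best.values(), reverse=True)[:3])
-- ===== Notes on version B (the rewrite author's own statement) =====
-- stated objective: simpler
-- what changed: The manual a/b/c streaming top-3 tracker (initialised to -1) is replaced by sorting the per-key maxima descending and summing the first three; the grouping map is built from zip(x, y) instead of enumerate plus defaultdict.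
import Mathlib
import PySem

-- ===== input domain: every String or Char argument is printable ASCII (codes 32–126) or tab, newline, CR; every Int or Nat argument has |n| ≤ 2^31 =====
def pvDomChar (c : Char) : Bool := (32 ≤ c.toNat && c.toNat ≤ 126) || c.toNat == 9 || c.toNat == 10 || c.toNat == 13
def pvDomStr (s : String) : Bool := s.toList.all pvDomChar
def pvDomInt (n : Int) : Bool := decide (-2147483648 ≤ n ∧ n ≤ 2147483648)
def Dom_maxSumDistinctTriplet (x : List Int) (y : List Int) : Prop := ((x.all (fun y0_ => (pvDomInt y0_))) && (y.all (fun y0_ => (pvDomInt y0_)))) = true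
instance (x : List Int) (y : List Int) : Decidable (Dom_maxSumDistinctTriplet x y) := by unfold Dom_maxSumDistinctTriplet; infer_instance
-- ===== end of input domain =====

-- B replaces A's hand-rolled streaming top-3 tracker by "sort the per-key maxima descending, sum the
-- first three" (objective: simpler); the grouping map is built from zip(x, y) instead of enumerate + y[i].

-- ===== PORT A =====
-- A-side helper: one step of A's `for n in nmap.values(): if n > a … elif n > b … elif n > c …` tracker.
def pvTop3Step (t : Int × Int × Int) (n : Int) : Int × Int × Int :=
  if n > t.1 then (n, t.1, t.2.1)
  else if n > t.2.1 then (t.1, n, t.2.1)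
  else if n > t.2.2 then (t.1, t.2.1, n)
  else t

-- `y[i]` is PySem.List.pyGet?; its `none` case (IndexError) is excluded by Pre_ below.
def maxSumDistinctTriplet (x : List Int) (y : List Int) : Int :=
  let nmap := (PySem.List.enumerate x).foldl
    (fun d (p : Int × Int) => d.insert p.2 (max (d.getD p.2 0) ((PySem.List.pyGet? y p.1).getD 0)))
    (PySem.Dict.empty : PySem.Dict Int Int)
  if nmap.size < 3 then -1
  else
    let t := nmap.values.foldl pvTop3Step (-1, -1, -1)
    t.1 + t.2.1 + t.2.2

-- ===== PORT B =====
def maxSumDistinctTriplet_alt (x : List Int) (y : List Int) : Int :=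
  let best := (x.zip y).foldl
    (fun d (p : Int × Int) => d.insert p.1 (max (d.getD p.1 0) p.2))
    (PySem.Dict.empty : PySem.Dict Int Int)
  if best.size < 3 then -1
  else ((PySem.List.sorted best.values (fun v => v) true).take 3).sum

-- ===== PRECONDITION & SPEC =====
-- Pre_ excludes exactly the inputs with len(x) > len(y), on which A raises IndexError at y[i].
def Pre_maxSumDistinctTriplet (x : List Int) (y : List Int) : Prop := x.length ≤ y.length
instance (x : List Int) (y : List Int) : Decidable (Pre_maxSumDistinctTriplet x y) := by unfold Pre_maxSumDistinctTriplet; infer_instance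
def pvWitness_maxSumDistinctTriplet : List Int × List Int := ([1, 2, 3], [4, 5, 6])

def Spec_maxSumDistinctTriplet (x : List Int) (y : List Int) (out : Int) : Prop := out = maxSumDistinctTriplet_alt x y
instance (x : List Int) (y : List Int) (out : Int) : Decidable (Spec_maxSumDistinctTriplet x y out) := by unfold Spec_maxSumDistinctTriplet; infer_instance

-- ===== CLAIM (what is proved, stated in full; the proofs are below) =====
def Claim_equal_maxSumDistinctTriplet : Prop := ∀ (x : List Int) (y : List Int), Dom_maxSumDistinctTriplet x y → Pre_maxSumDistinctTriplet x y → Spec_maxSumDistinctTriplet x y (maxSumDistinctTriplet x y)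

-- ===== LEMMAS AND PROOFS =====

-- `sorted(·, reverse=True)` with the identity key, as B uses it.
def pvSD (l : List Int) : List Int := PySem.List.sorted l (fun v => v) true

-- The two grouping loops build the same dict: A reads y[i] through the index that
-- enumerate pairs with each element, B pairs the elements directly with zip.
theorem pv_build_eq : ∀ (x ys zs : List Int) (d : PySem.Dict Int Int), x.length ≤ ys.length →
    (PySem.List.enumerate x (zs.length : Int)).foldl
      (fun d (p : Int × Int) => d.insert p.2 (max (d.getD p.2 0) ((PySem.List.pyGet? (zs ++ ys) p.1).getD 0))) d
    = (x.zip ys).foldl (fun d (p : Int × Int) => d.insert p.1 (max (d.getD p.1 0) p.2)) d := by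
  intro x
  induction x with
  | nil => intro ys zs d _; simp [PySem.List.enumerate]
  | cons n xs ih =>
    intro ys zs d h
    cases ys with
    | nil => simp at h
    | cons v ys' =>
      rw [PySem.List.enumerate_cons]
      simp only [List.zip_cons_cons, List.foldl_cons]
      have hget : (PySem.List.pyGet? (zs ++ v :: ys') ((zs.length : Int))).getD 0 = v := by
        rw [PySem.List.pyGet?_natCast]
        simp
      rw [hget]
      have hlen : (zs.length : Int) + 1 = (((zs ++ [v]).length : Nat) : Int) := by
        simp
      have happ : zs ++ v :: ys' = (zs ++ [v]) ++ ys' := by simp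
      rw [hlen, happ]
      exact ih ys' (zs ++ [v]) _ (by simpa using h)

theorem pv_getD_nonneg (d : PySem.Dict Int Int) (k : Int)
    (h : ∀ w ∈ d.values, 0 ≤ w) : 0 ≤ d.getD k 0 := by
  rw [PySem.Dict.getD_eq_get?_getD]
  cases hg : d.get? k with
  | none => simp
  | some v =>
    have : (k, v) ∈ d.items := PySem.Dict.mem_items_of_get?_eq_some d hg
    have hv : v ∈ d.values := by
      simp only [PySem.Dict.values]
      exact List.mem_map.mpr ⟨(k, v), this, rfl⟩
    simpa using h v hv

theorem pv_values_nonneg : ∀ (l : List (Int × Int)) (d : PySem.Dict Int Int),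
    (∀ w ∈ d.values, 0 ≤ w) →
    ∀ w ∈ (l.foldl (fun d (p : Int × Int) => d.insert p.1 (max (d.getD p.1 0) p.2)) d).values, 0 ≤ w := by
  intro l
  induction l with
  | nil => intro d h; simpa using h
  | cons p l ih =>
    intro d h
    simp only [List.foldl_cons]
    refine ih _ ?_
    intro w hw
    rcases PySem.Dict.mem_values_insert d p.1 _ w hw with hweq | hwmem
    · subst hweq
      exact le_trans (pv_getD_nonneg d p.1 h) (le_max_left _ _)
    · exact h w hwmem

theorem pv_sd_append (m : List Int) (n : Int) :
    pvSD (m ++ [n]) = PySem.List.insertBy (fun a b : Int => decide (b < a)) n (pvSD m) := by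
  simp [pvSD, PySem.List.sorted_rev_eq_foldl_insertBy, List.foldl_append]

theorem pv_insert_small (v p q r : Int) (rest : List Int)
    (hp : ¬ p < v) (hq : ¬ q < v) (hr : ¬ r < v) :
    PySem.List.insertBy (fun a b : Int => decide (b < a)) v (p :: q :: r :: rest)
      = p :: q :: r :: PySem.List.insertBy (fun a b : Int => decide (b < a)) v rest := by
  simp [PySem.List.insertBy, hp, hq, hr]

theorem pv_len3 (s : List Int) (h : 3 ≤ s.length) :
    ∃ p q r t, s = p :: q :: r :: t := by
  match s with
  | p :: q :: r :: t => exact ⟨p, q, r, t, rfl⟩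
  | [] | [_] | [_, _] => simp at h

theorem pv_sd_perm {xs ys : List Int} (h : xs.Perm ys) : pvSD xs = pvSD ys := by
  refine List.Perm.eq_of_pairwise (le := fun a b : Int => b ≤ a)
    (fun a b _ _ h1 h2 => le_antisymm h2 h1)
    (PySem.List.sorted_pairwise_rev xs (fun v => v))
    (PySem.List.sorted_pairwise_rev ys (fun v => v))
    (((PySem.List.sorted_perm xs _ true).trans h).trans
      (PySem.List.sorted_perm ys (fun v => v) true).symm)

-- A's streaming tracker computes the first three elements of the descending sort of
-- the initial triple (-1, -1, -1) followed by the scanned list.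
theorem pv_main : ∀ (l : List Int),
    l.foldl pvTop3Step (-1, -1, -1)
      = ((pvSD ([-1, -1, -1] ++ l)).getD 0 0,
         (pvSD ([-1, -1, -1] ++ l)).getD 1 0,
         (pvSD ([-1, -1, -1] ++ l)).getD 2 0) := by
  intro l
  induction l using List.reverseRecOn with
  | nil =>
    have : pvSD [-1, -1, -1] = [-1, -1, -1] := by
      apply PySem.List.sorted_rev_eq_self_of_pairwise
      simp
    simp [this]
  | append_singleton l' n ih =>
    obtain ⟨p, q, r, rest, hs⟩ := pv_len3 (pvSD ([-1, -1, -1] ++ l'))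
      (by simp [pvSD, PySem.List.length_sorted])
    rw [List.foldl_append, ih, show [-1, -1, -1] ++ (l' ++ [n]) = ([-1, -1, -1] ++ l') ++ [n] by simp,
        pv_sd_append, hs]
    simp only [List.foldl_cons, List.getD_cons_zero, List.getD_cons_succ]
    by_cases h1 : p < n
    · simp [PySem.List.insertBy, pvTop3Step, h1]
    · by_cases h2 : q < n
      · simp [PySem.List.insertBy, pvTop3Step, h1, h2]
      · by_cases h3 : r < n
        · simp [PySem.List.insertBy, pvTop3Step, h1, h2, h3]
        · simp [PySem.List.insertBy, pvTop3Step, h1, h2, h3]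

-- the selection step: streaming top-3 sum = sum of the first three of the descending sort
theorem pv_sel (vals : List Int) (h3 : 3 ≤ vals.length) (hnn : ∀ w ∈ vals, 0 ≤ w) :
    (vals.foldl pvTop3Step (-1, -1, -1)).1
      + (vals.foldl pvTop3Step (-1, -1, -1)).2.1
      + (vals.foldl pvTop3Step (-1, -1, -1)).2.2
    = ((pvSD vals).take 3).sum := by
  obtain ⟨p, q, r, rest, hs⟩ := pv_len3 (pvSD vals)
    (by simp [pvSD, PySem.List.length_sorted]; omega)
  have hmem : ∀ w ∈ pvSD vals, 0 ≤ w := by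
    intro w hw
    exact hnn w ((PySem.List.mem_sorted vals (fun v => v) true w).mp hw)
  have hp : 0 ≤ p := hmem p (by rw [hs]; simp)
  have hq : 0 ≤ q := hmem q (by rw [hs]; simp)
  have hr : 0 ≤ r := hmem r (by rw [hs]; simp)
  have hperm : pvSD ([-1, -1, -1] ++ vals) = pvSD (vals ++ [-1, -1, -1]) :=
    pv_sd_perm (List.perm_append_comm)
  have hstep : pvSD (vals ++ [-1, -1, -1])
      = p :: q :: r :: (PySem.List.insertBy (fun a b : Int => decide (b < a)) (-1)
         (PySem.List.insertBy (fun a b : Int => decide (b < a)) (-1)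
           (PySem.List.insertBy (fun a b : Int => decide (b < a)) (-1) rest))) := by
    have e1 : vals ++ [-1, -1, -1] = ((vals ++ [-1]) ++ [-1]) ++ [(-1 : Int)] := by simp
    rw [e1, pv_sd_append, pv_sd_append, pv_sd_append, hs,
        pv_insert_small _ _ _ _ _ (by omega) (by omega) (by omega),
        pv_insert_small _ _ _ _ _ (by omega) (by omega) (by omega),
        pv_insert_small _ _ _ _ _ (by omega) (by omega) (by omega)]
  rw [pv_main vals, hperm, hstep, hs]
  simp
  ring

-- finally: under Pre_, A = B
theorem pv_equal (x y : List Int) (hpre : x.length ≤ y.length) :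
    maxSumDistinctTriplet x y = maxSumDistinctTriplet_alt x y := by
  have hbuild := pv_build_eq x y [] PySem.Dict.empty hpre
  simp only [List.length_nil, Nat.cast_zero, List.nil_append] at hbuild
  simp only [maxSumDistinctTriplet, maxSumDistinctTriplet_alt, hbuild]
  set best := (x.zip y).foldl (fun d (p : Int × Int) => d.insert p.1 (max (d.getD p.1 0) p.2))
    (PySem.Dict.empty : PySem.Dict Int Int) with hbest
  by_cases hsz : best.size < 3
  · simp [hsz]
  · simp only [hsz, if_false]
    have h3 : 3 ≤ best.values.length := by
      have : best.values.length = best.size := by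
        simp [PySem.Dict.values, PySem.Dict.size]
      omega
    have hnn : ∀ w ∈ best.values, 0 ≤ w := by
      rw [hbest]
      apply pv_values_nonneg
      simp [PySem.Dict.empty, PySem.Dict.values]
    exact pv_sel best.values h3 hnn

-- ===== VERDICT (by name: the statement is the Claim_ definition above) =====
theorem maxSumDistinctTriplet_spec : Claim_equal_maxSumDistinctTriplet := by
  intro x y _ hpre
  exact pv_equal x y hpre
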